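-- pv_equiv track=rewrite | github.com/quangcrazymen/CS112 | Bai1/assignment1_8.py | func8_check
-- ===== SOURCE A (Python) =====
-- def func8_check(n):
--     i = 1
--     count = 0
--     gan_if_1 = 0
--     gan_if_2 = 0
--     gan_while=0
--     gan = 2
--     ss=0
--     while(i<=3*n):
--         ss +=1
--         x = 2*n - i
--         y = i - n
--         j = 1
--         gan += 3
--         while(j<=x):
--             ss+=1
--             if(j>=n):
--                 count-=1
--                 gan_if_1+=1
--                 gan += 1
--             j = j+1
--             gan+=1
--             gan_while+=1
--         ss+=1
--         if(y>0):
--             ss+=1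
--             if(x>0):
--                 ss+=1
--                 count+=1
--                 gan_if_2+=1
--                 gan+=1
--             ss+=1
--         ss+=1
--         i+=1
--         gan+=1
--     ss+=1
--     return gan,ss,gan_if_1,gan_while
-- ===== SOURCE B (Python) =====
-- def func8_check(n):
--     # Closed-form arithmetic-series evaluation of all four counters; O(1) instead of O(n^2).
--     if n < 1:
--         return 2, 1, 0, 0
--     gw = n * (2 * n - 1)
--     g1 = n * (n + 1) // 2
--     return 1 + 13 * n + gw + g1, 2 * n * n + 13 * n, g1, gw
-- ===== Notes on version B (the rewrite author's own statement) =====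
-- stated objective: faster
-- what changed: Replaced the O(n^2) nested counting loops by closed-form arithmetic-series formulas (triangular-number sums) evaluating all four counters in O(1).
import Mathlib
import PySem

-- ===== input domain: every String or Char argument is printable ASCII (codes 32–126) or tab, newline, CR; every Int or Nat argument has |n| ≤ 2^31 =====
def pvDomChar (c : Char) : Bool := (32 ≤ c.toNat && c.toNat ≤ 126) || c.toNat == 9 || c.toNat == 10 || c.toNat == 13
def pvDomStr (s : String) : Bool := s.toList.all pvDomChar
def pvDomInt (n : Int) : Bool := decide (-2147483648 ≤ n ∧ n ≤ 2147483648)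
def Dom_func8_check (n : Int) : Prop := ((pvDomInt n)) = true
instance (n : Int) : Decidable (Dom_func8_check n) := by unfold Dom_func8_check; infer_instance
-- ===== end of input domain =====

-- B replaces A's nested counting loops by closed-form arithmetic-series formulas (O(1) vs O(n^2)).

-- ===== PORT A =====
-- loop state: (count, gan_if_1, gan_if_2, gan_while, gan, ss)
structure St where
  count : Int
  ganIf1 : Int
  ganIf2 : Int
  ganWhile : Int
  gan : Int
  ss : Int
deriving DecidableEq, Repr

-- inner 'while(j<=x)' loop; fuel = number of iterations (x+1-j).toNat
def innerA (n : Int) : Nat → Int → St → St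
  | 0, _, s => s
  | m+1, j, s =>
    let s := { s with ss := s.ss + 1 }
    let s := if j ≥ n then
        { s with count := s.count - 1, ganIf1 := s.ganIf1 + 1, gan := s.gan + 1 }
      else s
    innerA n m (j+1) { s with gan := s.gan + 1, ganWhile := s.ganWhile + 1 }

-- outer 'while(i<=3*n)' loop; fuel = number of iterations (3n+1-i).toNat
def outerA (n : Int) : Nat → Int → St → St
  | 0, _, s => s
  | m+1, i, s =>
    let s := { s with ss := s.ss + 1 }
    let x := 2*n - i
    let y := i - n
    let s := { s with gan := s.gan + 3 }
    let s := innerA n x.toNat 1 s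
    let s := { s with ss := s.ss + 1 }
    let s := if y > 0 then
        (let s := { s with ss := s.ss + 1 }
         let s := if x > 0 then
             { s with ss := s.ss + 1, count := s.count + 1, ganIf2 := s.ganIf2 + 1, gan := s.gan + 1 }
           else s
         { s with ss := s.ss + 1 })
      else s
    outerA n m (i+1) { s with ss := s.ss + 1, gan := s.gan + 1 }

def func8_check (n : Int) : List Int :=
  let s := outerA n (3*n).toNat 1 ⟨0, 0, 0, 0, 2, 0⟩
  [s.gan, s.ss + 1, s.ganIf1, s.ganWhile]

-- ===== PORT B =====
def func8_check_alt (n : Int) : List Int :=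
  if n < 1 then [2, 1, 0, 0]
  else
    let gw := n * (2*n - 1)
    let g1 := PySem.Int.floordiv (n * (n + 1)) 2
    [1 + 13*n + gw + g1, 2*n*n + 13*n, g1, gw]

-- ===== PRECONDITION & SPEC =====
def Spec_func8_check (n : Int) (out : List Int) : Prop := out = func8_check_alt n
instance (n : Int) (out : List Int) : Decidable (Spec_func8_check n out) := by unfold Spec_func8_check; infer_instance

-- ===== CLAIM (what is proved, stated in full; the proofs are below) =====
def Claim_equal_func8_check : Prop := ∀ (n : Int), Dom_func8_check n → Spec_func8_check n (func8_check n)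

-- ===== LEMMAS AND PROOFS =====

-- triangular number T c = 1 + 2 + … + c (0 for c ≤ 0)
def T (c : Int) : Int :=
  if c ≤ 0 then 0 else c + T (c - 1)
termination_by c.toNat
decreasing_by omega

lemma T_nonpos (c : Int) (h : c ≤ 0) : T c = 0 := by
  rw [T]; simp [h]

lemma T_step (c : Int) : T c = max c 0 + T (c - 1) := by
  by_cases h : c ≤ 0
  · rw [T_nonpos c h, T_nonpos (c-1) (by omega)]; omega
  · rw [T]; simp [h]; omega

lemma T_closed (c : Int) : 2 * T c = max c 0 * (max c 0 + 1) := by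
  by_cases h : c ≤ 0
  · rw [T_nonpos c h]; rw [max_eq_right h]; ring
  · have hk : ∀ k : Nat, ∀ c : Int, c.toNat = k → 2 * T c = max c 0 * (max c 0 + 1) := by
      intro k
      induction k with
      | zero => intro c hc
                have : c ≤ 0 := by omega
                rw [T_nonpos c this, max_eq_right this]; ring
      | succ k ih =>
        intro c hc
        have hpos : 0 < c := by omega
        rw [T_step c]
        have h1 := ih (c - 1) (by omega)
        have hm : max c 0 = c := by omega
        have hm1 : max (c-1) 0 = c - 1 := by omega
        rw [hm] at *
        rw [hm1] at h1
        nlinarith [h1]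
    exact hk c.toNat c rfl

-- per-iteration sums of the outer loop, defined by the same left-to-right recursion
def SA (n : Int) : Nat → Int → Int
  | 0, _ => 0
  | m+1, i => max (2*n - i) 0 + SA n m (i+1)

def SB1 (n : Int) : Nat → Int → Int
  | 0, _ => 0
  | m+1, i => max (n + 1 - i) 0 + SB1 n m (i+1)

def SG (n : Int) : Nat → Int → Int
  | 0, _ => 0
  | m+1, i => (if n < i then 1 else 0) + SG n m (i+1)

def SH (n : Int) : Nat → Int → Int
  | 0, _ => 0
  | m+1, i => (if n < i ∧ i < 2*n then 1 else 0) + SH n m (i+1)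

lemma SA_eq (n : Int) : ∀ (m : Nat) (i : Int), SA n m i = T (2*n - i) - T (2*n - i - m) := by
  intro m
  induction m with
  | zero => intro i; simp [SA]
  | succ m ih =>
    intro i
    have h1 := ih (i+1)
    have e1 : 2*n - (i+1) = 2*n - i - 1 := by ring
    rw [e1] at h1
    have hT := T_step (2*n - i)
    simp only [SA, h1]
    push_cast
    rw [show 2*n - i - ((m : Int) + 1) = 2*n - i - 1 - (m : Int) from by ring]
    omega

lemma SB1_eq (n : Int) : ∀ (m : Nat) (i : Int), SB1 n m i = T (n + 1 - i) - T (n + 1 - i - m) := by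
  intro m
  induction m with
  | zero => intro i; simp [SB1]
  | succ m ih =>
    intro i
    have h1 := ih (i+1)
    have e1 : n + 1 - (i+1) = n + 1 - i - 1 := by ring
    rw [e1] at h1
    have hT := T_step (n + 1 - i)
    simp only [SB1, h1]
    push_cast
    rw [show n + 1 - i - ((m : Int) + 1) = n + 1 - i - 1 - (m : Int) from by ring]
    omega

lemma SG_eq (n : Int) : ∀ (m : Nat) (i : Int), SG n m i = (m : Int) - min (max (n + 1 - i) 0) (m : Int) := by
  intro m
  induction m with
  | zero => intro i; simp [SG]
  | succ m ih =>
    intro i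
    have h1 := ih (i+1)
    have e1 : n + 1 - (i+1) = n - i := by ring
    rw [e1] at h1
    simp only [SG, h1]
    push_cast
    split <;> omega

lemma SH_eq (n : Int) (hn : 1 ≤ n) : ∀ (m : Nat) (i : Int),
    SH n m i = min (max (2*n - i) 0) (m : Int) - min (max (n + 1 - i) 0) (m : Int) := by
  intro m
  induction m with
  | zero => intro i; simp [SH]
  | succ m ih =>
    intro i
    have h1 := ih (i+1)
    have e1 : n + 1 - (i+1) = n - i := by ring
    have e2 : 2*n - (i+1) = 2*n - i - 1 := by ring
    rw [e1] at h1
    rw [e2] at h1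
    simp only [SH, h1]
    push_cast
    split <;> omega

lemma inner_eq (n : Int) : ∀ (m : Nat) (j : Int) (s : St),
    innerA n m j s =
      ⟨s.count - ((m : Int) - min (max (n - j) 0) (m : Int)),
       s.ganIf1 + ((m : Int) - min (max (n - j) 0) (m : Int)),
       s.ganIf2,
       s.ganWhile + m,
       s.gan + m + ((m : Int) - min (max (n - j) 0) (m : Int)),
       s.ss + m⟩ := by
  intro m
  induction m with
  | zero => intro j s; simp [innerA]
  | succ m ih =>
    intro j s
    have h1 := ih (j+1)
    have e1 : n - (j+1) = n - j - 1 := by ring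
    rw [e1] at h1
    simp only [innerA, h1]
    split <;> (simp [St.mk.injEq]; omega)

lemma outer_eq (n : Int) (hn : 1 ≤ n) : ∀ (m : Nat) (i : Int) (s : St),
    outerA n m i s =
      ⟨s.count - SB1 n m i + SH n m i,
       s.ganIf1 + SB1 n m i,
       s.ganIf2 + SH n m i,
       s.ganWhile + SA n m i,
       s.gan + 4*m + SA n m i + SB1 n m i + SH n m i,
       s.ss + 3*m + SA n m i + 2 * SG n m i + SH n m i⟩ := by
  intro m
  induction m with
  | zero => intro i s; simp [outerA, SA, SB1, SG, SH]
  | succ m ih =>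
    intro i s
    simp only [outerA, inner_eq]
    rw [ih (i+1)]
    simp only [SA, SB1, SG, SH, St.mk.injEq]
    have ht : ((2*n - i).toNat : Int) = max (2*n - i) 0 := by omega
    split_ifs <;> (simp; omega)

theorem func8_check_spec : Claim_equal_func8_check := by
  unfold Claim_equal_func8_check Spec_func8_check
  intro n _
  by_cases hn : n < 1
  · have h0 : (3*n).toNat = 0 := by omega
    simp [func8_check, h0, outerA, func8_check_alt, hn]
  · have hn : 1 ≤ n := by omega
    have h3 : ((3*n).toNat : Int) = 3*n := by omega
    unfold func8_check
    rw [outer_eq n hn]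
    rw [SA_eq, SB1_eq, SG_eq, SH_eq n hn, h3]
    have hA2 : T (2*n - 1 - 3*n) = 0 := T_nonpos _ (by omega)
    have hB2 : T (n + 1 - 1 - 3*n) = 0 := T_nonpos _ (by omega)
    have hTa := T_closed (2*n - 1)
    have hTb := T_closed (n + 1 - 1)
    have hma : max (2*n - 1) 0 = 2*n - 1 := by omega
    have hmb : max (n + 1 - 1) 0 = n := by omega
    rw [hma] at hTa
    rw [hmb] at hTb
    unfold func8_check_alt
    rw [if_neg (by omega)]
    have hdiv : PySem.Int.floordiv (n * (n + 1)) 2 = T (n + 1 - 1) := by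
      rw [PySem.Int.floordiv_eq_ediv_of_pos (by omega)]
      omega
    rw [hdiv]
    rw [hA2, hB2]
    rw [show min (max (2*n - 1) 0) (3*n) = 2*n - 1 from by omega,
        show min (max (n + 1 - 1) 0) (3*n) = n from by omega]
    have h1 : (2*n - 1) * (2*n - 1 + 1) = 2*(n*(2*n - 1)) := by ring
    have h2 : (2*n - 1) * (2*n - 1 + 1) = 2*(2*n*n) - 2*n := by ring
    simp only [List.cons.injEq, and_true]
    refine ⟨by linarith, by linarith, by omega, by linarith⟩
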